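-- pv_equiv track=rewrite | github.com/holubp/gpx-segment-timer | tools/debug_match_metrics.py | _parse_segment_configs
-- ===== SOURCE A (Python) =====
-- from typing import Any, Dict, List, Optional, Tuple
--
-- def _parse_segment_configs(lines: List[str]) -> List[Dict[str, str]]:
--     blocks: List[Dict[str, str]] = []
--     in_block = False
--     current: Dict[str, str] = {}
--     for line in lines:
--         if "Segment config:" in line:
--             if current:
--                 blocks.append(current)
--             current = {}
--             in_block = True
--             continue
--         if in_block:
--             if " [INFO]   " not in line:
--                 if line.strip() == "":
--                     in_block = False
--                 continue
--             try:
--                 _, kv = line.split(" [INFO]   ", 1)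
--             except ValueError:
--                 continue
--             if "=" not in kv:
--                 continue
--             key, val = kv.strip().split("=", 1)
--             current[key.strip()] = val.strip()
--     if current:
--         blocks.append(current)
--     return blocks
-- ===== SOURCE B (Python) =====
-- from typing import Dict, List, Optional
--
-- def _parse_region(region: List[str]) -> Dict[str, str]:
--     d: Dict[str, str] = {}
--     for line in region:
--         if " [INFO]   " in line:
--             kv = line.split(" [INFO]   ", 1)[1]
--             if "=" in kv:
--                 key, val = kv.strip().split("=", 1)
--                 d[key.strip()] = val.strip()
--         elif line.strip() == "":
--             break
--     return d
--
-- def _parse_segment_configs(lines: List[str]) -> List[Dict[str, str]]: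
--     mark = "Segment config:"
--     # phase 1: cut the input into per-marker regions (lines before the first marker are ignored)
--     regions: List[List[str]] = []
--     cur: Optional[List[str]] = None
--     for line in lines:
--         if mark in line:
--             if cur is not None:
--                 regions.append(cur)
--             cur = []
--         elif cur is not None:
--             cur.append(line)
--     if cur is not None:
--         regions.append(cur)
--     # phase 2: parse each region independently, keep the non-empty dicts
--     blocks: List[Dict[str, str]] = []
--     for region in regions:
--         d = _parse_region(region)
--         if d:
--             blocks.append(d)
--     return blocks
-- ===== Notes on version B (the rewrite author's own statement) =====
-- stated objective: alternative
-- what changed: Replaces A's single-pass in_block/current state machine by a two-phase decomposition: one pass cuts the input into per-marker regions (ignoring lines before the first marker), then each region is parsed independently into a dict (breaking at the first blank line) and the non-empty dicts are kept.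
import Mathlib
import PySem

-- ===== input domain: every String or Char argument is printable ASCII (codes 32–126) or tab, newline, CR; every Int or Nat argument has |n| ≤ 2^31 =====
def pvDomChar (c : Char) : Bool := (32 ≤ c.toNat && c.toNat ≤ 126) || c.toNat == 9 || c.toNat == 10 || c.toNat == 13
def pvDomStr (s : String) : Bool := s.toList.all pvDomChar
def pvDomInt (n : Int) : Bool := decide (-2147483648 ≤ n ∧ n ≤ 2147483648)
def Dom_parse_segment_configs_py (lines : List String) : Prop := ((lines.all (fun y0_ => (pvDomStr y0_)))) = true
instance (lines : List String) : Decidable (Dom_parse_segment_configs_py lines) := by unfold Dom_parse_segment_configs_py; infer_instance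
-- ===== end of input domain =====

-- B replaces A's interleaved in_block state machine by a two-phase decomposition (cut the input into
-- per-marker regions, then parse each region independently); same return value, no speed claim.

-- ===== PORT A =====
-- one step of A's for-loop; state = (blocks, in_block, current)
def pa_step (st : List (List (String × String)) × Bool × PySem.Dict String String)
    (line : String) : List (List (String × String)) × Bool × PySem.Dict String String :=
  let (blocks, in_block, current) := st
  if PySem.Str.isIn "Segment config:" line then
    ((if current.size ≠ 0 then blocks ++ [current.items] else blocks), true, PySem.Dict.empty)
  else if in_block then
    if !(PySem.Str.isIn " [INFO]   " line) then
      (blocks, (if PySem.Str.strip line = "" then false else in_block), current)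
    else
      match PySem.Str.splitMax? line " [INFO]   " 1 with
      | some (_ :: kv :: _) =>
        if PySem.Str.isIn "=" kv then
          match PySem.Str.splitMax? (PySem.Str.strip kv) "=" 1 with
          | some (key :: val :: _) =>
              (blocks, in_block, current.insert (PySem.Str.strip key) (PySem.Str.strip val))
          | _ => (blocks, in_block, current)
        else (blocks, in_block, current)
      | _ => (blocks, in_block, current)
  else st

def parse_segment_configs_py (lines : List String) : List (List (String × String)) :=
  let st := lines.foldl pa_step ([], false, PySem.Dict.empty)
  if st.2.2.size ≠ 0 then st.1 ++ [st.2.2.items] else st.1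

-- ===== PORT B =====
def pb_isMark (line : String) : Bool := PySem.Str.isIn "Segment config:" line

-- the " [INFO]   key=val" rule of _parse_region's loop body
def pb_addLine (d : PySem.Dict String String) (line : String) : PySem.Dict String String :=
  match PySem.Str.splitMax? line " [INFO]   " 1 with
  | some (_ :: kv :: _) =>
    if PySem.Str.isIn "=" kv then
      match PySem.Str.splitMax? (PySem.Str.strip kv) "=" 1 with
      | some (key :: val :: _) => d.insert (PySem.Str.strip key) (PySem.Str.strip val)
      | _ => d
    else d
  | _ => d

-- _parse_region: walk the region, break at the first blank line (dict threaded as accumulator)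
def pb_region (region : List String) (d : PySem.Dict String String) : PySem.Dict String String :=
  match region with
  | [] => d
  | line :: rest =>
    if PySem.Str.isIn " [INFO]   " line then pb_region rest (pb_addLine d line)
    else if PySem.Str.strip line = "" then d
    else pb_region rest d

-- phase 1 loop body; state = (regions, cur) with cur = none before the first marker
def pb_splitStep (st : List (List String) × Option (List String)) (line : String) :
    List (List String) × Option (List String) :=
  let (regions, cur) := st
  if pb_isMark line then
    ((match cur with | some r => regions ++ [r] | none => regions), some [])
  else
    match cur with
    | some r => (regions, some (r ++ [line]))
    | none => (regions, cur)

def pb_split (lines : List String) : List (List String) :=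
  let st := lines.foldl pb_splitStep ([], none)
  match st.2 with
  | some r => st.1 ++ [r]
  | none => st.1

-- phase 2 loop body
def pb_blockStep (blocks : List (List (String × String))) (region : List String) :
    List (List (String × String)) :=
  let d := pb_region region PySem.Dict.empty
  if d.size ≠ 0 then blocks ++ [d.items] else blocks

def parse_segment_configs_py_alt (lines : List String) : List (List (String × String)) :=
  (pb_split lines).foldl pb_blockStep []

-- ===== PRECONDITION & SPEC =====
def Spec_parse_segment_configs_py (lines : List String) (out : List (List (String × String))) : Prop := out = parse_segment_configs_py_alt lines
instance (lines : List String) (out : List (List (String × String))) : Decidable (Spec_parse_segment_configs_py lines out) := by unfold Spec_parse_segment_configs_py; infer_instance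

-- ===== CLAIM (what is proved, stated in full; the proofs are below) =====
def Claim_equal_parse_segment_configs_py : Prop := ∀ (lines : List String), Dom_parse_segment_configs_py lines → Spec_parse_segment_configs_py lines (parse_segment_configs_py lines)

-- ===== LEMMAS AND PROOFS =====

-- proof-only reference decomposition: span off the marker-free region, rest starts at the next marker
def pb_takeRegion (ls : List String) : List String × List String :=
  match ls with
  | [] => ([], [])
  | l :: ls' =>
    if pb_isMark l then ([], l :: ls')
    else
      let (r, rest) := pb_takeRegion ls'
      (l :: r, rest)

theorem pb_takeRegion_rest_le (ls : List String) : (pb_takeRegion ls).2.length ≤ ls.length := by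
  induction ls with
  | nil => simp [pb_takeRegion]
  | cons l ls' ih =>
    simp only [pb_takeRegion]
    split
    · simp
    · simpa using Nat.le_succ_of_le ih

-- the regions after a marker, as the reference recursion
def pb_regs (ls : List String) : List (List String) :=
  let pr := pb_takeRegion ls
  pr.1 :: (match h : pr.2 with
           | [] => []
           | _ :: rest' => pb_regs rest')
termination_by ls.length
decreasing_by
  have := pb_takeRegion_rest_le ls
  rw [h] at this
  simp at this
  omega

theorem pb_regs_eq (ls : List String) :
    pb_regs ls = (pb_takeRegion ls).1 ::
      (match (pb_takeRegion ls).2 with | [] => [] | _ :: rest' => pb_regs rest') := by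
  rw [pb_regs]
  congr 1
  cases h2 : (pb_takeRegion ls).2 <;> rfl

-- the blocks produced from position just after a marker, as the reference recursion
def pb_go (ls : List String) : List (List (String × String)) :=
  let pr := pb_takeRegion ls
  let d := pb_region pr.1 PySem.Dict.empty
  (if d.size ≠ 0 then [d.items] else []) ++
    (match h : pr.2 with
     | [] => []
     | _ :: rest' => pb_go rest')
termination_by ls.length
decreasing_by
  have := pb_takeRegion_rest_le ls
  rw [h] at this
  simp at this
  omega

theorem pb_go_eq (ls : List String) :
    pb_go ls
      = (if (pb_region (pb_takeRegion ls).1 PySem.Dict.empty).size ≠ 0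
          then [(pb_region (pb_takeRegion ls).1 PySem.Dict.empty).items] else []) ++
        (match (pb_takeRegion ls).2 with | [] => [] | _ :: rest' => pb_go rest') := by
  rw [pb_go]
  congr 1
  cases h2 : (pb_takeRegion ls).2 <;> rfl

-- finishing step of A: append current if non-empty
def pa_finish (st : List (List (String × String)) × Bool × PySem.Dict String String) :
    List (List (String × String)) :=
  if st.2.2.size ≠ 0 then st.1 ++ [st.2.2.items] else st.1

-- finishing step of B's phase 1: flush cur if a marker was ever seen
def pb_splitFinish (st : List (List String) × Option (List String)) : List (List String) :=
  match st.2 with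
  | some r => st.1 ++ [r]
  | none => st.1

-- step lemmas for A's state machine, one per branch of the Python loop body
theorem pa_step_mark (blocks : List (List (String × String))) (b : Bool)
    (d : PySem.Dict String String) (m : String) (hm : pb_isMark m = true) :
    pa_step (blocks, b, d) m
      = ((if d.size ≠ 0 then blocks ++ [d.items] else blocks), true, PySem.Dict.empty) := by
  simp [pa_step, pb_isMark] at hm ⊢
  simp [hm]

theorem pa_step_noblock (blocks : List (List (String × String)))
    (d : PySem.Dict String String) (l : String) (hl : pb_isMark l = false) :
    pa_step (blocks, false, d) l = (blocks, false, d) := by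
  simp [pa_step, pb_isMark] at hl ⊢
  simp [hl]

theorem pa_step_info (blocks : List (List (String × String)))
    (d : PySem.Dict String String) (l : String) (hl : pb_isMark l = false)
    (hinfo : PySem.Str.isIn " [INFO]   " l = true) :
    pa_step (blocks, true, d) l = (blocks, true, pb_addLine d l) := by
  simp [pa_step, pb_isMark] at hl hinfo ⊢
  simp [hl, hinfo, pb_addLine]
  cases hs : PySem.Str.splitMax? l " [INFO]   " 1 with
  | none => rfl
  | some parts =>
    rcases parts with _ | ⟨p, _ | ⟨kv, t⟩⟩
    · rfl
    · rfl
    · by_cases he : PySem.Chars.isIn ['='] kv.toList = true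
      · simp only [he, if_true]
        cases hs2 : PySem.Str.splitMax? (PySem.Str.strip kv) "=" 1 with
        | none => rfl
        | some q => rcases q with _ | ⟨k2, _ | ⟨v2, t2⟩⟩ <;> rfl
      · simp [he]

theorem pa_step_blank (blocks : List (List (String × String)))
    (d : PySem.Dict String String) (l : String) (hl : pb_isMark l = false)
    (hinfo : PySem.Str.isIn " [INFO]   " l = false) (hb : PySem.Str.strip l = "") :
    pa_step (blocks, true, d) l = (blocks, false, d) := by
  simp [pa_step, pb_isMark] at hl hinfo ⊢
  simp [hl, hinfo, hb]

theorem pa_step_other (blocks : List (List (String × String)))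
    (d : PySem.Dict String String) (l : String) (hl : pb_isMark l = false)
    (hinfo : PySem.Str.isIn " [INFO]   " l = false) (hb : ¬ PySem.Str.strip l = "") :
    pa_step (blocks, true, d) l = (blocks, true, d) := by
  simp [pa_step, pb_isMark] at hl hinfo ⊢
  simp [hl, hinfo, hb]

-- unfolding lemmas for B's region parser
theorem pb_region_info (d : PySem.Dict String String) (l : String) (rest : List String)
    (hinfo : PySem.Str.isIn " [INFO]   " l = true) :
    pb_region (l :: rest) d = pb_region rest (pb_addLine d l) := by
  simp only [pb_region]
  simp at hinfo
  simp [hinfo]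

theorem pb_region_blank (d : PySem.Dict String String) (l : String) (rest : List String)
    (hinfo : PySem.Str.isIn " [INFO]   " l = false) (hb : PySem.Str.strip l = "") :
    pb_region (l :: rest) d = d := by
  simp only [pb_region]
  simp at hinfo
  simp [hinfo, hb]

theorem pb_region_other (d : PySem.Dict String String) (l : String) (rest : List String)
    (hinfo : PySem.Str.isIn " [INFO]   " l = false) (hb : ¬ PySem.Str.strip l = "") :
    pb_region (l :: rest) d = pb_region rest d := by
  simp only [pb_region]
  simp at hinfo
  simp [hinfo, hb]

-- step lemmas for B's splitter
theorem pb_splitStep_mark (regions : List (List String)) (cur : Option (List String))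
    (m : String) (hm : pb_isMark m = true) :
    pb_splitStep (regions, cur) m
      = ((match cur with | some r => regions ++ [r] | none => regions), some []) := by
  simp [pb_splitStep, hm]

theorem pb_splitStep_some (regions : List (List String)) (r : List String)
    (l : String) (hl : pb_isMark l = false) :
    pb_splitStep (regions, some r) l = (regions, some (r ++ [l])) := by
  simp [pb_splitStep, hl]

theorem pb_splitStep_none (regions : List (List String)) (l : String)
    (hl : pb_isMark l = false) :
    pb_splitStep (regions, none) l = (regions, none) := by
  simp [pb_splitStep, hl]

-- with in_block = false, non-marker lines leave A's state unchanged
theorem pa_fold_false (ls : List String) (h : ∀ l ∈ ls, pb_isMark l = false)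
    (blocks : List (List (String × String))) (d : PySem.Dict String String) :
    ls.foldl pa_step (blocks, false, d) = (blocks, false, d) := by
  induction ls with
  | nil => rfl
  | cons l ls' ih =>
    have hl : pb_isMark l = false := h l (List.mem_cons_self)
    rw [List.foldl_cons, pa_step_noblock blocks d l hl]
    exact ih (fun x hx => h x (List.mem_cons_of_mem _ hx))

-- over a marker-free region starting in a block, A's fold computes pb_region (flag left unspecified)
theorem pa_fold_region (ls : List String) (h : ∀ l ∈ ls, pb_isMark l = false)
    (blocks : List (List (String × String))) (d : PySem.Dict String String) :
    ∃ b : Bool, ls.foldl pa_step (blocks, true, d) = (blocks, b, pb_region ls d) := by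
  induction ls generalizing d with
  | nil => exact ⟨true, rfl⟩
  | cons l ls' ih =>
    have hl : pb_isMark l = false := h l (List.mem_cons_self)
    have h' : ∀ x ∈ ls', pb_isMark x = false := fun x hx => h x (List.mem_cons_of_mem _ hx)
    by_cases hinfo : PySem.Str.isIn " [INFO]   " l = true
    · rw [List.foldl_cons, pa_step_info blocks d l hl hinfo, pb_region_info d l ls' hinfo]
      exact ih h' (pb_addLine d l)
    · simp only [Bool.not_eq_true] at hinfo
      by_cases hblank : PySem.Str.strip l = ""
      · rw [List.foldl_cons, pa_step_blank blocks d l hl hinfo hblank,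
            pa_fold_false ls' h' blocks d, pb_region_blank d l ls' hinfo hblank]
        exact ⟨false, rfl⟩
      · rw [List.foldl_cons, pa_step_other blocks d l hl hinfo hblank,
            pb_region_other d l ls' hinfo hblank]
        exact ih h' d

-- over a marker-free region, B's splitter just appends the lines to cur
theorem pb_fold_some (ls : List String) (h : ∀ l ∈ ls, pb_isMark l = false)
    (regions : List (List String)) (cur : List String) :
    ls.foldl pb_splitStep (regions, some cur) = (regions, some (cur ++ ls)) := by
  induction ls generalizing cur with
  | nil => simp
  | cons l ls' ih =>
    have hl : pb_isMark l = false := h l (List.mem_cons_self)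
    rw [List.foldl_cons, pb_splitStep_some regions cur l hl,
        ih (fun x hx => h x (List.mem_cons_of_mem _ hx)) (cur ++ [l])]
    simp

-- pb_takeRegion is a span: region ++ rest = ls, region marker-free, rest empty or marker-headed
theorem pb_takeRegion_spec (ls : List String) :
    (pb_takeRegion ls).1 ++ (pb_takeRegion ls).2 = ls ∧
    (∀ l ∈ (pb_takeRegion ls).1, pb_isMark l = false) ∧
    (∀ m rest', (pb_takeRegion ls).2 = m :: rest' → pb_isMark m = true) := by
  induction ls with
  | nil => simp [pb_takeRegion]
  | cons l ls' ih =>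
    simp only [pb_takeRegion]
    by_cases hm : pb_isMark l = true
    · simp only [hm, if_true]
      refine ⟨rfl, by simp, ?_⟩
      intro m rest' he
      cases he; exact hm
    · simp only [hm]
      obtain ⟨h1, h2, h3⟩ := ih
      refine ⟨by simpa using h1, ?_, h3⟩
      intro x hx
      rcases List.mem_cons.mp hx with h | h
      · subst h; simpa using hm
      · exact h2 x h

-- A's main loop invariant: right after a marker, the remaining fold finishes to blocks ++ pb_go ls
theorem pa_main (ls : List String) (blocks : List (List (String × String))) :
    pa_finish (ls.foldl pa_step (blocks, true, PySem.Dict.empty)) = blocks ++ pb_go ls := by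
  induction hn : ls.length using Nat.strong_induction_on generalizing ls blocks with
  | _ n ih =>
  obtain ⟨hsplit, hfree, hhead⟩ := pb_takeRegion_spec ls
  obtain ⟨b, hfold⟩ := pa_fold_region (pb_takeRegion ls).1 hfree blocks PySem.Dict.empty
  have hfold2 : List.foldl pa_step (blocks, true, PySem.Dict.empty) ls
      = List.foldl pa_step (blocks, b, pb_region (pb_takeRegion ls).1 PySem.Dict.empty)
          (pb_takeRegion ls).2 := by
    conv_lhs => rw [← hsplit]
    rw [List.foldl_append, hfold]
  rw [hfold2, pb_go_eq]
  cases hr : (pb_takeRegion ls).2 with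
  | nil =>
    simp only [List.foldl_nil, List.append_nil, pa_finish]
    split <;> simp
  | cons m rest' =>
    rw [List.foldl_cons, pa_step_mark blocks b _ m (hhead m rest' hr)]
    have hlen : rest'.length < n := by
      have h1 := pb_takeRegion_rest_le ls
      rw [hr] at h1
      simp only [List.length_cons] at h1
      omega
    rw [ih rest'.length hlen rest' _ rfl]
    split <;> simp

-- B's splitter invariant: right after a marker, phase 1 finishes to regions ++ cur-extended pb_regs
theorem pb_main (ls : List String) (regions : List (List String)) (cur : List String) :
    pb_splitFinish (ls.foldl pb_splitStep (regions, some cur))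
      = regions ++ (cur ++ (pb_takeRegion ls).1) ::
          (match (pb_takeRegion ls).2 with | [] => [] | _ :: rest' => pb_regs rest') := by
  induction hn : ls.length using Nat.strong_induction_on generalizing ls regions cur with
  | _ n ih =>
  obtain ⟨hsplit, hfree, hhead⟩ := pb_takeRegion_spec ls
  have hfold2 : List.foldl pb_splitStep (regions, some cur) ls
      = List.foldl pb_splitStep (regions, some (cur ++ (pb_takeRegion ls).1))
          (pb_takeRegion ls).2 := by
    conv_lhs => rw [← hsplit]
    rw [List.foldl_append, pb_fold_some (pb_takeRegion ls).1 hfree regions cur]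
  rw [hfold2]
  cases hr : (pb_takeRegion ls).2 with
  | nil => simp [pb_splitFinish]
  | cons m rest' =>
    rw [List.foldl_cons, pb_splitStep_mark regions _ m (hhead m rest' hr)]
    have hlen : rest'.length < n := by
      have h1 := pb_takeRegion_rest_le ls
      rw [hr] at h1
      simp only [List.length_cons] at h1
      omega
    rw [ih rest'.length hlen rest' _ [] rfl]
    simp [pb_regs_eq rest']

-- phase 2 folded over the reference regions list produces pb_go
theorem pb_blocks_regs (ls : List String) (acc : List (List (String × String))) :
    (pb_regs ls).foldl pb_blockStep acc = acc ++ pb_go ls := by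
  induction hn : ls.length using Nat.strong_induction_on generalizing ls acc with
  | _ n ih =>
  rw [pb_regs_eq, pb_go_eq]
  cases hr : (pb_takeRegion ls).2 with
  | nil =>
    simp only [List.foldl_cons, List.foldl_nil, pb_blockStep, List.append_nil]
    split <;> simp
  | cons m rest' =>
    have hlen : rest'.length < n := by
      have h1 := pb_takeRegion_rest_le ls
      rw [hr] at h1
      simp only [List.length_cons] at h1
      omega
    rw [List.foldl_cons, ih rest'.length hlen rest' _ rfl]
    simp only [pb_blockStep]
    split <;> simp

-- skip phase, A side: before the first marker, with in_block = false and current empty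
theorem pa_skip (ls : List String) (blocks : List (List (String × String))) :
    pa_finish (ls.foldl pa_step (blocks, false, PySem.Dict.empty))
      = blocks ++ (match ls.dropWhile (fun l => !(pb_isMark l)) with
                   | [] => []
                   | _ :: ls' => pb_go ls') := by
  induction ls generalizing blocks with
  | nil => simp [pa_finish, PySem.Dict.empty, PySem.Dict.size]
  | cons l ls' ih =>
    by_cases hm : pb_isMark l = true
    · have hstep : pa_step (blocks, false, PySem.Dict.empty) l = (blocks, true, PySem.Dict.empty) := by
        rw [pa_step_mark blocks false PySem.Dict.empty l hm]
        simp [PySem.Dict.empty, PySem.Dict.size]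
      rw [List.foldl_cons, hstep, pa_main ls' blocks]
      simp [hm]
    · simp only [Bool.not_eq_true] at hm
      rw [List.foldl_cons, pa_step_noblock blocks PySem.Dict.empty l hm, ih blocks]
      simp [hm]

-- skip phase, B side: before the first marker, cur is none and nothing happens
theorem pb_skip (ls : List String) (regions : List (List String)) :
    pb_splitFinish (ls.foldl pb_splitStep (regions, none))
      = regions ++ (match ls.dropWhile (fun l => !(pb_isMark l)) with
                    | [] => []
                    | _ :: ls' => pb_regs ls') := by
  induction ls generalizing regions with
  | nil => simp [pb_splitFinish]
  | cons l ls' ih =>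
    by_cases hm : pb_isMark l = true
    · rw [List.foldl_cons, pb_splitStep_mark regions none l hm, pb_main ls' regions []]
      simp [pb_regs_eq ls', hm]
    · simp only [Bool.not_eq_true] at hm
      rw [List.foldl_cons, pb_splitStep_none regions l hm, ih regions]
      simp [hm]

-- ===== VERDICT (by name: the statement is the Claim_ definition above) =====
theorem parse_segment_configs_py_spec : Claim_equal_parse_segment_configs_py := by
  intro lines _
  unfold Spec_parse_segment_configs_py parse_segment_configs_py parse_segment_configs_py_alt
  have hb : pb_split lines = pb_splitFinish (lines.foldl pb_splitStep ([], none)) := rfl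
  rw [hb, pb_skip lines []]
  have ha := pa_skip lines []
  simp only [List.nil_append] at ha ⊢
  rw [show (if (List.foldl pa_step ([], false, PySem.Dict.empty) lines).2.2.size ≠ 0
        then (List.foldl pa_step ([], false, PySem.Dict.empty) lines).1 ++
          [(List.foldl pa_step ([], false, PySem.Dict.empty) lines).2.2.items]
        else (List.foldl pa_step ([], false, PySem.Dict.empty) lines).1)
      = pa_finish (lines.foldl pa_step ([], false, PySem.Dict.empty)) from rfl, ha]
  cases hd : lines.dropWhile (fun l => !(pb_isMark l)) with
  | nil => rfl
  | cons x ls' => exact (pb_blocks_regs ls' []).symm
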